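-- pv_equiv track=rewrite | github.com/LiuQH-lab/FindSpinGroup | src/findspingroup/find_spin_group.py | _fractional_translation_neighbor_keys
-- ===== SOURCE A (Python) =====
-- def _fractional_translation_neighbor_keys(bucket_key, bins: int, neighbor_radius: int):
--     for dx in range(-neighbor_radius, neighbor_radius + 1):
--         for dy in range(-neighbor_radius, neighbor_radius + 1):
--             for dz in range(-neighbor_radius, neighbor_radius + 1):
--                 yield (
--                     (bucket_key[0] + dx) % bins,
--                     (bucket_key[1] + dy) % bins,
--                     (bucket_key[2] + dz) % bins,
--                 )
-- ===== SOURCE B (Python) =====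
-- def _fractional_translation_neighbor_keys(bucket_key, bins: int, neighbor_radius: int):
--     # Single flat loop over the (2r+1)^3 cell indices, decoded into (dx, dy, dz)
--     # by two divmods, instead of three nested range loops.
--     w = 2 * neighbor_radius + 1
--     bx = bucket_key[0] - neighbor_radius
--     by = bucket_key[1] - neighbor_radius
--     bz = bucket_key[2] - neighbor_radius
--     for i in range(w * w * w):
--         q, dz = divmod(i, w)
--         dx, dy = divmod(q, w)
--         yield ((bx + dx) % bins, (by + dy) % bins, (bz + dz) % bins)
-- ===== Notes on version B (the rewrite author's own statement) =====
-- stated objective: alternative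
-- what changed: B replaces the three nested loops by one flat loop over the (2r+1)^3 linear cell indices, decoding each index into (dx, dy, dz) with two divmods against the window width before applying the modulo to precomputed base coordinates.
import Mathlib
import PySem

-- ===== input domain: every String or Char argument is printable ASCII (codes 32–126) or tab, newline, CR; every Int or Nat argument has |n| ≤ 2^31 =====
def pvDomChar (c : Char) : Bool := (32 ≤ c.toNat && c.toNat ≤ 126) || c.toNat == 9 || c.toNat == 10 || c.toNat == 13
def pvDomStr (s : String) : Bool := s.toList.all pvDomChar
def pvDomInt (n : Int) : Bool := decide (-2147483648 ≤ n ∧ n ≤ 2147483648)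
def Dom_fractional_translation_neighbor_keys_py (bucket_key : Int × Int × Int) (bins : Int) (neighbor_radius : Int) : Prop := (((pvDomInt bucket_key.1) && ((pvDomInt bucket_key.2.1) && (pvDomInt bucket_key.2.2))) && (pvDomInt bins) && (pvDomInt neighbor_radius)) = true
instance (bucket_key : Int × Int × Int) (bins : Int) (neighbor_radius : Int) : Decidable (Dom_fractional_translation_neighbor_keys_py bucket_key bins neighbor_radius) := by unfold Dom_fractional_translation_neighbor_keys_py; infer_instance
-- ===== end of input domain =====

-- B replaces the three nested loops by one flat loop over the (2r+1)^3 linear indices,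
-- decoding each index into (dx, dy, dz) with two divmods (objective: alternative).
-- Both Pythons are generators; the list of yielded values is what is ported and compared.

-- ===== PORT A =====
-- triple-nested 'for' loops, each over range(-r, r+1), yielding one tuple in the innermost body
def fractional_translation_neighbor_keys_py (bucket_key : Int × Int × Int) (bins : Int) (neighbor_radius : Int) : List (Int × Int × Int) :=
  (PySem.List.pyRange (-neighbor_radius) (neighbor_radius + 1) 1).foldl (fun acc dx =>
    (PySem.List.pyRange (-neighbor_radius) (neighbor_radius + 1) 1).foldl (fun acc dy =>
      (PySem.List.pyRange (-neighbor_radius) (neighbor_radius + 1) 1).foldl (fun acc dz =>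
        acc ++ [(PySem.Int.mod (bucket_key.1 + dx) bins,
                 PySem.Int.mod (bucket_key.2.1 + dy) bins,
                 PySem.Int.mod (bucket_key.2.2 + dz) bins)]) acc) acc) []

-- ===== PORT B =====
-- one flat 'for i in range(w*w*w)' yielding one tuple per index = map over the index range;
-- divmod(i, w) is ported as (floordiv i w, mod i w), exact here since w = 2r+1 is never 0
def fractional_translation_neighbor_keys_py_alt (bucket_key : Int × Int × Int) (bins : Int) (neighbor_radius : Int) : List (Int × Int × Int) :=
  let w := 2 * neighbor_radius + 1
  let bx := bucket_key.1 - neighbor_radius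
  let by' := bucket_key.2.1 - neighbor_radius
  let bz := bucket_key.2.2 - neighbor_radius
  (PySem.List.pyRange 0 (w * w * w) 1).map (fun i =>
    let q := PySem.Int.floordiv i w
    let dz := PySem.Int.mod i w
    let dx := PySem.Int.floordiv q w
    let dy := PySem.Int.mod q w
    (PySem.Int.mod (bx + dx) bins, PySem.Int.mod (by' + dy) bins, PySem.Int.mod (bz + dz) bins))

-- ===== PRECONDITION & SPEC =====
-- Pre_ excludes exactly the inputs where Python's '%' raises ZeroDivisionError in both A and B:
-- bins = 0 with a nonempty offset range (neighbor_radius ≥ 0).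
def Pre_fractional_translation_neighbor_keys_py (_bucket_key : Int × Int × Int) (bins : Int) (neighbor_radius : Int) : Prop := bins ≠ 0 ∨ neighbor_radius < 0
instance (bucket_key : Int × Int × Int) (bins : Int) (neighbor_radius : Int) : Decidable (Pre_fractional_translation_neighbor_keys_py bucket_key bins neighbor_radius) := by unfold Pre_fractional_translation_neighbor_keys_py; infer_instance
def pvWitness_fractional_translation_neighbor_keys_py : (Int × Int × Int) × Int × Int := ((1, 2, 3), 4, 1)

def Spec_fractional_translation_neighbor_keys_py (bucket_key : Int × Int × Int) (bins : Int) (neighbor_radius : Int) (out : List (Int × Int × Int)) : Prop := out = fractional_translation_neighbor_keys_py_alt bucket_key bins neighbor_radius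
instance (bucket_key : Int × Int × Int) (bins : Int) (neighbor_radius : Int) (out : List (Int × Int × Int)) : Decidable (Spec_fractional_translation_neighbor_keys_py bucket_key bins neighbor_radius out) := by unfold Spec_fractional_translation_neighbor_keys_py; infer_instance

-- ===== CLAIM (what is proved, stated in full; the proofs are below) =====
def Claim_equal_fractional_translation_neighbor_keys_py : Prop := ∀ (bucket_key : Int × Int × Int) (bins : Int) (neighbor_radius : Int), Dom_fractional_translation_neighbor_keys_py bucket_key bins neighbor_radius → Pre_fractional_translation_neighbor_keys_py bucket_key bins neighbor_radius → Spec_fractional_translation_neighbor_keys_py bucket_key bins neighbor_radius (fractional_translation_neighbor_keys_py bucket_key bins neighbor_radius)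

-- ===== LEMMAS AND PROOFS =====

-- index decoding: range (n*m) decoded by (· / m, · % m) is the cartesian product of ranges
theorem pv_decode_pair (n m : Nat) :
    (List.range (n * m)).map (fun k => (k / m, k % m)) =
      (List.range n).flatMap (fun a => (List.range m).map (fun b => (a, b))) := by
  induction n with
  | zero => simp
  | succ n ih =>
      rw [Nat.succ_mul, List.range_add, List.map_append, ih, List.range_succ, List.flatMap_append]
      congr 1
      simp only [List.map_map, List.flatMap_cons, List.flatMap_nil, List.append_nil,
        List.map_inj_left, Function.comp]
      intro j hj
      have hjm : j < m := List.mem_range.mp hj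
      have hd : (n * m + j) / m = n := by
        rw [Nat.add_comm, Nat.add_mul_div_right _ _ (by omega : 0 < m)]
        simp [Nat.div_eq_of_lt hjm]
      have hm' : (n * m + j) % m = j := by
        rw [Nat.add_comm, Nat.add_mul_mod_self_right]
        exact Nat.mod_eq_of_lt hjm
      rw [hd, hm']

theorem pv_decode_map {α : Type} (n m : Nat) (F : Nat → Nat → α) :
    (List.range (n * m)).map (fun k => F (k / m) (k % m)) =
      (List.range n).flatMap (fun a => (List.range m).map (F a)) := by
  have h := congrArg (List.map (fun p : Nat × Nat => F p.1 p.2)) (pv_decode_pair n m)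
  simpa only [List.map_map, List.map_flatMap, Function.comp] using h

theorem pv_decode_flatMap {α : Type} (n m : Nat) (F : Nat → Nat → List α) :
    (List.range (n * m)).flatMap (fun k => F (k / m) (k % m)) =
      (List.range n).flatMap (fun a => (List.range m).flatMap (F a)) := by
  have h := congrArg (fun l => List.flatMap (fun p : Nat × Nat => F p.1 p.2) l) (pv_decode_pair n m)
  simpa only [List.flatMap_map, List.flatMap_assoc] using h

-- A's folds as flatMaps
theorem pv_A_flatMap (bk : Int × Int × Int) (bins r : Int) :
    fractional_translation_neighbor_keys_py bk bins r =
      (PySem.List.pyRange (-r) (r + 1) 1).flatMap (fun dx =>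
        (PySem.List.pyRange (-r) (r + 1) 1).flatMap (fun dy =>
          (PySem.List.pyRange (-r) (r + 1) 1).map (fun dz =>
            (PySem.Int.mod (bk.1 + dx) bins,
             PySem.Int.mod (bk.2.1 + dy) bins,
             PySem.Int.mod (bk.2.2 + dz) bins)))) := by
  unfold fractional_translation_neighbor_keys_py
  simp only [PySem.List.foldl_append_singleton_eq_map, PySem.List.foldl_append_eq_flatMap,
    List.nil_append]

-- ===== VERDICT (by name: the statement is the Claim_ definition above) =====
theorem fractional_translation_neighbor_keys_py_spec : Claim_equal_fractional_translation_neighbor_keys_py := by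
  intro bk bins r _ _
  unfold Spec_fractional_translation_neighbor_keys_py
  rw [pv_A_flatMap]
  unfold fractional_translation_neighbor_keys_py_alt
  by_cases hr : 0 ≤ r
  · -- nonempty window: both sides are the same triple product over range W
    obtain ⟨W, hw⟩ : ∃ W : Nat, (2 * r + 1 : Int) = (W : Int) := ⟨(2 * r + 1).toNat, by omega⟩
    have hrange : PySem.List.pyRange (-r) (r + 1) 1 =
        (List.range W).map (fun k : Nat => -r + (k : Int)) := by
      have hlen : ((r + 1 : Int) - -r).toNat = W := by omega
      rw [PySem.List.pyRange_one, hlen]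
    have hrangeB : PySem.List.pyRange 0 ((W : Int) * W * W) 1 =
        (List.range (W * W * W)).map (fun k : Nat => (k : Int)) := by
      have h1 : (((W : Int) * W * W) - 0).toNat = W * W * W := by
        have hc : ((W : Int) * W * W) = ((W * W * W : Nat) : Int) := by push_cast; ring
        omega
      rw [PySem.List.pyRange_one, h1]
      refine List.map_congr_left ?_
      intro k _
      omega
    simp only [hw]
    rw [hrangeB, hrange]
    simp only [List.map_map]
    have hdecode : ∀ k : Nat, k ∈ List.range (W * W * W) →
        ((fun i =>
            (PySem.Int.mod (bk.1 - r + PySem.Int.floordiv (PySem.Int.floordiv i (W : Int)) (W : Int)) bins,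
             PySem.Int.mod (bk.2.1 - r + PySem.Int.mod (PySem.Int.floordiv i (W : Int)) (W : Int)) bins,
             PySem.Int.mod (bk.2.2 - r + PySem.Int.mod i (W : Int)) bins)) ∘ (fun k : Nat => (k : Int))) k =
          (PySem.Int.mod (bk.1 - r + ((k / W / W : Nat) : Int)) bins,
           PySem.Int.mod (bk.2.1 - r + ((k / W % W : Nat) : Int)) bins,
           PySem.Int.mod (bk.2.2 - r + ((k % W : Nat) : Int)) bins) := by
      intro k _
      simp only [Function.comp, PySem.Int.floordiv_natCast, PySem.Int.mod_natCast]
    rw [List.map_congr_left hdecode]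
    have e1 := pv_decode_map (W * W) W (fun q c =>
        (PySem.Int.mod (bk.1 - r + ((q / W : Nat) : Int)) bins,
         PySem.Int.mod (bk.2.1 - r + ((q % W : Nat) : Int)) bins,
         PySem.Int.mod (bk.2.2 - r + (c : Int)) bins))
    simp only [] at e1
    rw [e1]
    have e2 := pv_decode_flatMap W W (fun a b => (List.range W).map (fun (c : Nat) =>
        (PySem.Int.mod (bk.1 - r + (a : Int)) bins,
         PySem.Int.mod (bk.2.1 - r + (b : Int)) bins,
         PySem.Int.mod (bk.2.2 - r + (c : Int)) bins)))
    simp only [] at e2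
    rw [e2]
    simp only [List.flatMap_map, Function.comp_def]
    have harith : ∀ (v : Int) (k : Nat), v + (-r + (k : Int)) = v - r + k := fun v k => by ring
    simp only [harith]
  · -- r < 0: both ranges are empty
    have h1 : PySem.List.pyRange (-r) (r + 1) 1 = [] :=
      PySem.List.pyRange_one_eq_nil (by omega)
    have h2 : PySem.List.pyRange 0 ((2 * r + 1) * (2 * r + 1) * (2 * r + 1)) 1 = [] := by
      refine PySem.List.pyRange_one_eq_nil ?_
      nlinarith [mul_self_nonneg (2 * r + 1)]
    simp [h1, h2]
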